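-- pv_equiv track=rewrite | github.com/JoohyungDev/algorithm | 파이알고_100/순열과 조합/특정_범위_조합_찾기.py | solution
-- ===== SOURCE A (Python) =====
-- import itertools
--
-- def solution(data):
--     my_list, _min, _max = data
--     cnt = 0
--     for i in range(len(my_list)):
--         nCr = itertools.combinations(my_list, i + 1)
--         for j in nCr:
--             if _min <= sum(j) <= _max:
--                 cnt += 1
--     return cnt
-- ===== SOURCE B (Python) =====
-- def solution(data):
--     my_list, _min, _max = data
--     sums = [0]
--     for x in my_list:
--         sums += [s + x for s in sums]
--     total = 0
--     for s in sums:
--         if _min <= s <= _max: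
--             total += 1
--     if _min <= 0 <= _max:
--         total -= 1
--     return total
-- ===== Notes on version B (the rewrite author's own statement) =====
-- stated objective: alternative
-- what changed: A enumerates combinations of every size k and re-sums each tuple; B makes one doubling pass that maintains the list of all subset sums, counts those in range, and subtracts the empty subset.
import Mathlib
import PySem

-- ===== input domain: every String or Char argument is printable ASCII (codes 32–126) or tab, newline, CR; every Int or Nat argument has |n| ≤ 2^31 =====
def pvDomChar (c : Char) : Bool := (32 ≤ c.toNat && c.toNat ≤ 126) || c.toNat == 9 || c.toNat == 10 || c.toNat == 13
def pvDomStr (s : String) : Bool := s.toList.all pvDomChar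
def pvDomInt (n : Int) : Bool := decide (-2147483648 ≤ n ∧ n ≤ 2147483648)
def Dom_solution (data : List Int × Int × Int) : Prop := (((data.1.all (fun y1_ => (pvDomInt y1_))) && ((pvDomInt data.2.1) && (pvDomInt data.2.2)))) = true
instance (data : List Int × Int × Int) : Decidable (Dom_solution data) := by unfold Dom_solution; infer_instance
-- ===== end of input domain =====

-- B replaces A's size-by-size enumeration of combinations (re-summing every tuple)
-- by one doubling pass maintaining the multiset of subset sums; objective: alternative.

-- ===== PORT A =====
-- itertools.combinations(my_list, k) ported as List.sublistsLen k my_list (the k-element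
-- subsequences; only their count within the sum range is used, so order is irrelevant).
def solution (data : List Int × Int × Int) : Int :=
  let my_list := data.1
  let mn := data.2.1
  let mx := data.2.2
  (PySem.List.pyRange 0 my_list.length 1).foldl (fun cnt i =>
    (List.sublistsLen (i + 1).toNat my_list).foldl
      (fun c j => if mn ≤ j.sum ∧ j.sum ≤ mx then c + 1 else c) cnt) 0

-- ===== PORT B =====
def solution_alt (data : List Int × Int × Int) : Int :=
  let sums := data.1.foldl (fun sums x => sums ++ sums.map (fun s => s + x)) [0]
  let total := sums.foldl
    (fun t s => if data.2.1 ≤ s ∧ s ≤ data.2.2 then t + 1 else t) (0 : Int)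
  if data.2.1 ≤ 0 ∧ 0 ≤ data.2.2 then total - 1 else total

-- ===== PRECONDITION & SPEC =====
def Spec_solution (data : List Int × Int × Int) (out : Int) : Prop := out = solution_alt data
instance (data : List Int × Int × Int) (out : Int) : Decidable (Spec_solution data out) := by unfold Spec_solution; infer_instance

-- ===== CLAIM (what is proved, stated in full; the proofs are below) =====
def Claim_equal_solution : Prop := ∀ (data : List Int × Int × Int), Dom_solution data → Spec_solution data (solution data)

-- ===== LEMMAS AND PROOFS =====

-- counting over a fold of counts = counting over the flatMap
theorem pv_foldl_count_flatMap {α β : Type} (q : β → Bool) (f : α → List β) :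
    ∀ (L : List α) (c0 : Int),
      L.foldl (fun c i => c + ((f i).countP q : Int)) c0 = c0 + (((L.flatMap f).countP q : Int)) := by
  intro L
  induction L with
  | nil => intro c0; simp
  | cons a L ih =>
    intro c0
    simp only [List.foldl_cons, List.flatMap_cons, List.countP_append, ih]
    push_cast
    ring

-- splitting a flatMap of appended blocks, up to permutation
theorem pv_flatMap_append_perm {α β : Type} (f g : α → List β) :
    ∀ (L : List α), List.Perm (L.flatMap (fun t => f t ++ g t)) (L.flatMap f ++ L.flatMap g) := by
  intro L
  induction L with
  | nil => simp
  | cons a L ih =>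
    simp only [List.flatMap_cons]
    refine ((ih.append_left _)).trans ?_
    simp only [List.append_assoc]
    exact List.Perm.append_left (f a) (List.perm_append_comm_assoc _ _ _)

-- the doubling fold produces (a permutation of) all sums of sublists, shifted by S
theorem pv_doubling_perm :
    ∀ (l : List Int) (S : List Int),
      List.Perm (l.foldl (fun sums x => sums ++ sums.map (fun s => s + x)) S)
        ((l.sublists').flatMap (fun t => S.map (fun s => s + t.sum))) := by
  intro l
  induction l with
  | nil => intro S; simp
  | cons x l ih =>
    intro S
    simp only [List.foldl_cons]
    refine (ih _).trans ?_
    have hsimp : (l.sublists').flatMap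
          (fun t => (S ++ S.map (fun s => s + x)).map (fun s => s + t.sum))
        = (l.sublists').flatMap
            (fun t => S.map (fun s => s + t.sum) ++ S.map (fun s => s + (x + t.sum))) := by
      refine List.flatMap_congr ?_
      intro t _
      simp
    rw [hsimp]
    refine (pv_flatMap_append_perm _ _ _).trans ?_
    rw [List.sublists'_cons, List.flatMap_append, List.flatMap_map]
    simp

theorem solution_spec : Claim_equal_solution := by
  unfold Claim_equal_solution Spec_solution
  rintro ⟨l, mn, mx⟩ _
  set q : List Int → Bool := fun t => decide (mn ≤ t.sum ∧ t.sum ≤ mx) with hq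
  set p : Int → Bool := fun s => decide (mn ≤ s ∧ s ≤ mx) with hp
  -- A as a countP over the flatMap of sublistsLen (k+1)
  have hinner : ∀ (c : Int) (k : ℕ),
      (List.sublistsLen ((k : Int) + 1).toNat l).foldl
        (fun c j => if mn ≤ j.sum ∧ j.sum ≤ mx then c + 1 else c) c
      = c + ((List.sublistsLen (k + 1) l).countP q : Int) := by
    intro c k
    have h1 : ((k : Int) + 1).toNat = k + 1 := by omega
    rw [h1, PySem.List.foldl_ite_add_one]
  have hA : solution (l, mn, mx)
      = (((List.range l.length).flatMap (fun k => List.sublistsLen (k + 1) l)).countP q : Int) := by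
    simp only [solution]
    rw [PySem.List.pyRange_zero_nat, List.foldl_map]
    simp only [hinner]
    rw [pv_foldl_count_flatMap]
    simp
  -- counting over sublists' splits off the empty sublist
  have hsplit : ((l.sublists').countP q)
      = (if p 0 = true then 1 else 0)
        + ((List.range l.length).flatMap (fun k => List.sublistsLen (k + 1) l)).countP q := by
    rw [(List.range_bind_sublistsLen_perm l).symm.countP_eq]
    rw [List.range_succ_eq_map, List.flatMap_cons, List.flatMap_map]
    have hq0 : q [] = p 0 := by rfl
    simp only [List.sublistsLen_zero, List.singleton_append, List.countP_cons, hq0]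
    cases p 0 <;> simp [Nat.add_comm]
  -- B as a countP over sublists'
  have hB : solution_alt (l, mn, mx)
      = (if p 0 = true then ((l.sublists').countP q : Int) - 1
         else ((l.sublists').countP q : Int)) := by
    simp only [solution_alt]
    rw [PySem.List.foldl_ite_add_one]
    have h1 : (l.foldl (fun sums x => sums ++ sums.map (fun s => s + x)) [0]).countP p
        = (l.sublists').countP q := by
      rw [(pv_doubling_perm l [0]).countP_eq]
      have h2 : (l.sublists').flatMap (fun t => [(0 : Int)].map (fun s => s + t.sum))
          = (l.sublists').map (fun t => t.sum) := by
        induction l.sublists' with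
        | nil => simp
        | cons a L ih => simp_all
      rw [h2, List.countP_map]
      rfl
    rw [h1]
    simp [hp]
  rw [hA, hB, hsplit]
  cases hp0 : p 0 <;> simp
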